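-- pv_equiv track=rewrite | github.com/stryder199/RyarkAssignments | Assignment2/web2py/applications/cqg/question/generate_util.py | genCPRow
-- ===== SOURCE A (Python) =====
-- def genCPRow(domains):
-- 	'''
-- 	Purpose
-- 		yields each row in cross product of the n domains
-- 	Precondition
-- 		domains is a list containing n domains over which to form
-- 		 cross product
-- 		must specify at least one domain
-- 	'''
-- 	# if there is more than one domain specified
-- 	if len(domains) > 1:
-- 		# get a row of the cross product of the first n-1 domains
-- 		for sublist in genCPRow(domains[:-1]):
-- 			# for every element in this domain, append it to row
-- 			for item in iter(domains[ len(domains)-1 ]):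
-- 				yield  sublist + [item]
--
-- 	# if only one domain given, yield its elements
-- 	else:
-- 		for item in iter(domains[ len(domains)-1 ]):
-- 			yield [item]
-- ===== SOURCE B (Python) =====
-- def genCPRow(domains):
--     rows = [[]]
--     for domain in domains:
--         rows = [r + [item] for r in rows for item in domain]
--     for r in rows:
--         yield r
-- ===== Notes on version B (the rewrite author's own statement) =====
-- stated objective: alternative
-- what changed: Replaces A's recursion on the last domain (rebuilding prefix slices each level) by a single left-to-right fold that extends every partial row with each element of the next domain.
-- crash fix: On an empty domains list A raises IndexError (it indexes domains[-1]); B yields one empty row []. — e.g. on genCPRow([]): A raises IndexError, B returns [[]]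
import Mathlib
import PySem

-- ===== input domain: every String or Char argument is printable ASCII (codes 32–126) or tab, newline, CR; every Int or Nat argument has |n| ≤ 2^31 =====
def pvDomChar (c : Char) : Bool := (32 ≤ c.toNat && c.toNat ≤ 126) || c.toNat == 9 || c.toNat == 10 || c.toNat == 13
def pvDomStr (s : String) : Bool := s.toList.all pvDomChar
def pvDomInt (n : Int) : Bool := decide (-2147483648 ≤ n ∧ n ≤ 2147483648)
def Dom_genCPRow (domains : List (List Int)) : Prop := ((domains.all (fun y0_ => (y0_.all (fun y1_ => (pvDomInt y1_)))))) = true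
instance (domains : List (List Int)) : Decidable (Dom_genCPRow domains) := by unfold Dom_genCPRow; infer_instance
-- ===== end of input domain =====

-- B replaces A's recursion on the last domain by a single left-to-right fold; alternative decomposition, same asymptotic cost.


-- ===== PORT A =====
-- A recurses on domains[:-1] and appends each element of the last domain to each recursive row.
-- domains[len(domains)-1] raises IndexError on [] (excluded by Pre_); the .getD [] is unreachable inside Pre_.
def genCPRow (domains : List (List Int)) : List (List Int) :=
  if h : domains.length > 1 then
    (genCPRow (PySem.List.slice domains none (some (-1)))).flatMap
      (fun sublist =>
        ((PySem.List.pyGet? domains ((domains.length : Int) - 1)).getD []).map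
          (fun item => sublist ++ [item]))
  else
    ((PySem.List.pyGet? domains ((domains.length : Int) - 1)).getD []).map (fun item => [item])
termination_by domains.length
decreasing_by
  simp [PySem.List.slice_to_neg_one]
  omega

-- ===== PORT B =====
-- Source B: rows = [[]]; for domain in domains: rows = [r + [item] for r in rows for item in domain]; yield rows
def genCPRow_alt (domains : List (List Int)) : List (List Int) :=
  domains.foldl (fun rows domain => rows.flatMap (fun r => domain.map (fun item => r ++ [item]))) [[]]

-- ===== PRECONDITION & SPEC =====
-- Pre_ excludes only the empty list of domains, on which A raises IndexError (domains[-1]).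
def Pre_genCPRow (domains : List (List Int)) : Prop := domains ≠ []
instance (domains : List (List Int)) : Decidable (Pre_genCPRow domains) := by unfold Pre_genCPRow; infer_instance
def pvWitness_genCPRow : List (List Int) := [[1, 2], [3]]

-- On the empty domains list A raises IndexError (it indexes domains[-1]); B yields one empty row [].
def Raises_genCPRow (domains : List (List Int)) : Prop := domains = []
instance (domains : List (List Int)) : Decidable (Raises_genCPRow domains) := by unfold Raises_genCPRow; infer_instance
def pvRaiseWitness_genCPRow : List (List Int) := []
def pvRaiseWitnessOut_genCPRow : List (List Int) := [[]]

def Spec_genCPRow (domains : List (List Int)) (out : List (List Int)) : Prop := out = genCPRow_alt domains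
instance (domains : List (List Int)) (out : List (List Int)) : Decidable (Spec_genCPRow domains out) := by unfold Spec_genCPRow; infer_instance

-- ===== CLAIM (what is proved, stated in full; the proofs are below) =====
def Claim_equal_genCPRow : Prop := ∀ (domains : List (List Int)), Dom_genCPRow domains → Pre_genCPRow domains → Spec_genCPRow domains (genCPRow domains)
def Claim_raises_genCPRow : Prop := (∀ (domains : List (List Int)), Dom_genCPRow domains → Raises_genCPRow domains → ¬ Pre_genCPRow domains) ∧ (Dom_genCPRow (pvRaiseWitness_genCPRow) ∧ Raises_genCPRow (pvRaiseWitness_genCPRow) ∧ genCPRow_alt (pvRaiseWitness_genCPRow) = pvRaiseWitnessOut_genCPRow)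

-- ===== LEMMAS AND PROOFS =====

theorem alt_append (ds : List (List Int)) (d : List Int) :
    genCPRow_alt (ds ++ [d]) = (genCPRow_alt ds).flatMap (fun r => d.map (fun item => r ++ [item])) := by
  simp [genCPRow_alt, List.foldl_append]

theorem gen_eq_alt : ∀ (ds : List (List Int)), ds ≠ [] → genCPRow ds = genCPRow_alt ds := by
  intro ds
  induction ds using List.reverseRecOn with
  | nil => intro h; exact absurd rfl h
  | append_singleton ds d ih =>
    intro _
    rcases List.eq_nil_or_concat' ds with h | ⟨ds', d', h⟩
    · subst h
      rw [genCPRow]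
      simp [genCPRow_alt, PySem.List.pyGet?, PySem.List.pyIdx?]
    · have hne : ds ≠ [] := by subst h; simp
      have hlen : (ds ++ [d]).length > 1 := by
        subst h; simp
      rw [genCPRow]
      rw [dif_pos hlen]
      rw [PySem.List.slice_to_neg_one]
      have hdrop : (ds ++ [d]).dropLast = ds := by simp
      have hget : PySem.List.pyGet? (ds ++ [d]) (((ds ++ [d]).length : Int) - 1) = some d := by
        have h1 : ((ds ++ [d]).length : Int) - 1 = (ds.length : Int) := by
          simp
        rw [h1]
        exact PySem.List.pyGet?_append_length (pre := ds) (y := d) (ys := [])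
      rw [hdrop, hget, alt_append, ih hne]
      simp

-- ===== VERDICT (by name: the statement is the Claim_ definition above) =====
theorem genCPRow_spec : Claim_equal_genCPRow := by
  intro ds _ hpre
  unfold Spec_genCPRow
  exact gen_eq_alt ds hpre

def genCPRow_raises : Claim_raises_genCPRow := by
  unfold Claim_raises_genCPRow
  exact ⟨fun ds _ hr hp => hp hr, by decide⟩
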